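-- pv_equiv track=rewrite | github.com/gomin0/algorithm-study | 프로그래머스/2/150368. 이모티콘 할인행사/이모티콘 할인행사.py | solution
-- ===== SOURCE A (Python) =====
-- import itertools
--
-- def solution(users, emoticons):
--     # 이모티콘 할인의 가능한 모든 경우의 수 생성 (10%, 20%, 30%, 40%)
--     discount_rates = [10, 20, 30, 40]
--     possible_discounts = list(itertools.product(discount_rates, repeat=len(emoticons)))
--
--     # 결과 변수 (최대 가입자 수, 최대 매출액)
--     max_subscribers = 0
--     max_sales = 0
--
--     # 가능한 모든 할인 조합에 대해 계산
--     for discounts in possible_discounts: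
--         subscribers = 0  # 현재 할인 조합에서의 가입자 수
--         sales = 0  # 현재 할인 조합에서의 매출액
--
--         # 각 사용자에 대해 계산
--         for rate, threshold in users:
--             total_purchase = 0  # 해당 사용자의 총 구매액
--
--             # 이모티콘별로 할인 가격을 적용하여 계산
--             for i, price in enumerate(emoticons):
--                 discount_price = price * (100 - discounts[i]) // 100  # 할인된 가격
--                 if discounts[i] >= rate:
--                     total_purchase += discount_price  # 해당 사용자가 구매하는 가격
--
--             # 사용자가 플러스 서비스에 가입하는지 확인
--             if total_purchase >= threshold:
--                 subscribers += 1  # 가입자 수 증가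
--             else:
--                 sales += total_purchase  # 사용자가 구매한 금액을 매출액에 더함
--
--         # 최적의 값으로 갱신
--         if subscribers > max_subscribers or (subscribers == max_subscribers and sales > max_sales):
--             max_subscribers = subscribers
--             max_sales = sales
--
--     return [max_subscribers, max_sales]
-- ===== SOURCE B (Python) =====
-- def solution(users, emoticons):
--     rates = [10, 20, 30, 40]
--     n = len(emoticons)
--     best = [0, 0]
--
--     def dfs(i, chosen):
--         if i == n:
--             subscribers = 0
--             sales = 0
--             for rate, threshold in users:
--                 total = 0
--                 for d, price in zip(chosen, emoticons):
--                     if d >= rate: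
--                         total += price * (100 - d) // 100
--                 if total >= threshold:
--                     subscribers += 1
--                 else:
--                     sales += total
--             if subscribers > best[0] or (subscribers == best[0] and sales > best[1]):
--                 best[0] = subscribers
--                 best[1] = sales
--             return
--         for r in rates:
--             dfs(i + 1, chosen + [r])
--
--     dfs(0, [])
--     return best
-- ===== Notes on version B (the rewrite author's own statement) =====
-- stated objective: alternative
-- what changed: Replaced materializing the full itertools.product list of discount combinations with a recursive DFS over emoticon indices that evaluates each complete assignment at the leaves and updates the running best in place.
import Mathlib
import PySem

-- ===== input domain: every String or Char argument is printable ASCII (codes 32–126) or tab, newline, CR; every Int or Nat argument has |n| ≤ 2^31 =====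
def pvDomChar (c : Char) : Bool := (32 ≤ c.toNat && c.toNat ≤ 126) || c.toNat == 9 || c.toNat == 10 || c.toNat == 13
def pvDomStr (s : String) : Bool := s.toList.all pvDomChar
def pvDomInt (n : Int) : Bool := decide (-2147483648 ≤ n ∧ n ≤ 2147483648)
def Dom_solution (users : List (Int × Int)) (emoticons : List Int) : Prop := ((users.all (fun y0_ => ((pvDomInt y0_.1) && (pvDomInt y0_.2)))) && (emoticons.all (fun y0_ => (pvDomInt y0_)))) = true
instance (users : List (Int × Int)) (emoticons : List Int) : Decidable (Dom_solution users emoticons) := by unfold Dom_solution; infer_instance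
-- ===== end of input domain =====

-- B replaces A's materialized itertools.product list with a recursive DFS over
-- emoticon indices, updating the running best at each leaf (alternative decomposition).


-- ===== PORT A =====
-- itertools.product([10,20,30,40], repeat=n), in product's order (leftmost slot slowest)
def aProd (n : Nat) : List (List Int) :=
  match n with
  | 0 => [[]]
  | k + 1 => ([10, 20, 30, 40] : List Int).flatMap (fun r => (aProd k).map (fun t => r :: t))

-- inner two loops for one discount combination: returns (subscribers, sales).
-- "discounts[i]" for i, price in enumerate(emoticons) is ported via zip, exact because
-- every tuple of the product has length len(emoticons).
def aEval (users : List (Int × Int)) (emoticons : List Int) (discounts : List Int) : Int × Int :=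
  users.foldl (fun (acc : Int × Int) u =>
    let total := (List.zip discounts emoticons).foldl
      (fun (t : Int) (p : Int × Int) =>
        let dp := PySem.Int.floordiv (p.2 * (100 - p.1)) 100
        if p.1 ≥ u.1 then t + dp else t) 0
    if total ≥ u.2 then (acc.1 + 1, acc.2) else (acc.1, acc.2 + total)) (0, 0)

-- the update of (max_subscribers, max_sales) for one combination
def aStep (users : List (Int × Int)) (emoticons : List Int) (best : Int × Int) (discounts : List Int) : Int × Int :=
  let r := aEval users emoticons discounts
  if r.1 > best.1 ∨ (r.1 = best.1 ∧ r.2 > best.2) then r else best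

def solution (users : List (Int × Int)) (emoticons : List Int) : List Int :=
  let best := (aProd emoticons.length).foldl (aStep users emoticons) (0, 0)
  [best.1, best.2]

-- ===== PORT B =====
-- leaf evaluation of Source B's dfs: per-user totals over zip(chosen, emoticons), then best update
def bLeaf (users : List (Int × Int)) (emoticons : List Int) (chosen : List Int) (best : Int × Int) : Int × Int :=
  let r := users.foldl (fun (acc : Int × Int) u =>
    let total := (List.zip chosen emoticons).foldl
      (fun (t : Int) (p : Int × Int) =>
        if p.1 ≥ u.1 then t + PySem.Int.floordiv (p.2 * (100 - p.1)) 100 else t) 0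
    if total ≥ u.2 then (acc.1 + 1, acc.2) else (acc.1, acc.2 + total)) (0, 0)
  if r.1 > best.1 ∨ (r.1 = best.1 ∧ r.2 > best.2) then r else best

-- dfs(i, chosen); the Nat argument is n - i, the number of slots still to fill
def bDfs (users : List (Int × Int)) (emoticons : List Int) : Nat → List Int → Int × Int → Int × Int
  | 0, chosen, best => bLeaf users emoticons chosen best
  | k + 1, chosen, best =>
      ([10, 20, 30, 40] : List Int).foldl (fun b r => bDfs users emoticons k (chosen ++ [r]) b) best

def solution_alt (users : List (Int × Int)) (emoticons : List Int) : List Int :=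
  let best := bDfs users emoticons emoticons.length [] (0, 0)
  [best.1, best.2]

-- ===== PRECONDITION & SPEC =====
def Spec_solution (users : List (Int × Int)) (emoticons : List Int) (out : List Int) : Prop := out = solution_alt users emoticons
instance (users : List (Int × Int)) (emoticons : List Int) (out : List Int) : Decidable (Spec_solution users emoticons out) := by unfold Spec_solution; infer_instance

-- ===== CLAIM (what is proved, stated in full; the proofs are below) =====
def Claim_equal_solution : Prop := ∀ (users : List (Int × Int)) (emoticons : List Int), Dom_solution users emoticons → Spec_solution users emoticons (solution users emoticons)

-- ===== LEMMAS AND PROOFS =====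

theorem bLeaf_eq_aStep (users : List (Int × Int)) (emoticons : List Int)
    (chosen : List Int) (best : Int × Int) :
    bLeaf users emoticons chosen best = aStep users emoticons best chosen := rfl

theorem foldl_flatMap' {α β γ : Type} (f : α → List β) (g : γ → β → γ) (l : List α) (init : γ) :
    (l.flatMap f).foldl g init = l.foldl (fun b a => (f a).foldl g b) init := by
  induction l generalizing init with
  | nil => rfl
  | cons x xs ih => simp [List.flatMap_cons, List.foldl_append, ih]

theorem bDfs_eq_foldl (users : List (Int × Int)) (emoticons : List Int) :
    ∀ (k : Nat) (chosen : List Int) (best : Int × Int),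
      bDfs users emoticons k chosen best =
        (aProd k).foldl (fun b t => aStep users emoticons b (chosen ++ t)) best := by
  intro k
  induction k with
  | zero => intro chosen best; simp [bDfs, aProd, bLeaf_eq_aStep]
  | succ k ih =>
    intro chosen best
    simp only [bDfs, aProd, foldl_flatMap', List.foldl_map]
    apply PySem.List.foldl_congr_mem
    intro b r _
    rw [ih]
    apply PySem.List.foldl_congr_mem
    intro b' t _
    simp [List.append_assoc]

-- ===== VERDICT (by name: the statement is the Claim_ definition above) =====
theorem solution_spec : Claim_equal_solution := by
  intro users emoticons _
  show _ = _
  unfold solution solution_alt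
  rw [bDfs_eq_foldl]
  simp
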